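-- pv_equiv track=rewrite | github.com/Beminent-yun/Generative_Retrieval | evaluate.py | normalize_beam_schedule
-- ===== SOURCE A (Python) =====
-- from typing import Dict, List, Tuple
--
-- def build_dynamic_beam_schedule(max_beam_size: int, num_steps: int) -> List[int]:
--     """
--     默认动态 beam schedule：
--     - L=4, beam=20 -> [20, 20, 20, 20]
--     - L=4, beam=10 -> [10, 10, 10, 10]
--     """
--     if num_steps <= 0:
--         return []
--     return [max(1, max_beam_size)] * num_steps
--
-- def normalize_beam_schedule(
--     beam_size: int,
--     num_steps: int,
--     beam_schedule: List[int] | None = None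
-- ) -> List[int]:
--     if beam_schedule is None:
--         return build_dynamic_beam_schedule(beam_size, num_steps)
--
--     if len(beam_schedule) != num_steps:
--         raise ValueError(
--             f"beam_schedule length ({len(beam_schedule)}) must equal num_rq_layers ({num_steps})"
--         )
--
--     normalized = [max(1, min(beam_size, int(v))) for v in beam_schedule]
--     for idx in range(1, len(normalized)):
--         normalized[idx] = min(normalized[idx - 1], normalized[idx])
--     return normalized
-- ===== SOURCE B (Python) =====
-- def _prefix_min(seg):
--     # prefix minima by divide and conquer: split in half, compute each half's
--     # prefix minima, then offset the right half by the left half's final minimum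
--     if len(seg) <= 1:
--         return list(seg)
--     mid = len(seg) // 2
--     left = _prefix_min(seg[:mid])
--     right = _prefix_min(seg[mid:])
--     last = left[-1]
--     return left + [min(last, r) for r in right]
--
--
-- def normalize_beam_schedule(beam_size, num_steps, beam_schedule=None):
--     if beam_schedule is None:
--         return [] if num_steps <= 0 else [max(1, beam_size)] * num_steps
--     if len(beam_schedule) != num_steps:
--         raise ValueError(
--             f"beam_schedule length ({len(beam_schedule)}) must equal num_rq_layers ({num_steps})"
--         )
--     # clamp AFTER taking prefix minima: clamping is monotone, so it commutes with min
--     return [max(1, min(beam_size, int(m))) for m in _prefix_min(beam_schedule)]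
-- ===== Notes on version B (the rewrite author's own statement) =====
-- stated objective: alternative
-- what changed: B computes the prefix minima of the raw schedule by divide-and-conquer (split in half, recurse, offset the right half by the left half's final minimum) and applies the [1, beam_size] clamp afterwards -- correct because the clamp is monotone and so commutes with min -- instead of A's clamp-first comprehension followed by an index-based in-place running-min loop.
import Mathlib
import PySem

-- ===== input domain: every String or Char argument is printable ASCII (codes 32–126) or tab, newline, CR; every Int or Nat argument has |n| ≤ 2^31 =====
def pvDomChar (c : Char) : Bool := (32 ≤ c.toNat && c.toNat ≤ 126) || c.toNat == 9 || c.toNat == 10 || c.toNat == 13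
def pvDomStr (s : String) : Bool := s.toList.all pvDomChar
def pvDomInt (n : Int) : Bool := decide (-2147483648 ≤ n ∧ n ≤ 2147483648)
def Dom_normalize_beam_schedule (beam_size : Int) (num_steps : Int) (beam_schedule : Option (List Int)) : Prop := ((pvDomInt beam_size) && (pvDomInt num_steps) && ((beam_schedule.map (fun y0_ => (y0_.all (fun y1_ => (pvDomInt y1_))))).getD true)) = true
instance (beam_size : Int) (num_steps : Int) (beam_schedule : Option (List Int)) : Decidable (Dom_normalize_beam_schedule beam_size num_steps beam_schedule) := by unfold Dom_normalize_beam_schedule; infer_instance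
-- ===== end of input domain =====

-- B replaces A's clamp-first comprehension + index-based in-place running-min loop by a
-- divide-and-conquer prefix-minimum of the raw schedule followed by the clamp (clamp commutes with min).

-- ===== PORT A =====
def build_dynamic_beam_schedule (max_beam_size : Int) (num_steps : Int) : List Int :=
  if num_steps ≤ 0 then []
  else List.replicate num_steps.toNat (max 1 max_beam_size)

def normalize_beam_schedule (beam_size : Int) (num_steps : Int) (beam_schedule : Option (List Int)) : List Int :=
  match beam_schedule with
  | none => build_dynamic_beam_schedule beam_size num_steps
  | some l =>
    if (l.length : Int) ≠ num_steps then []  -- Python raises ValueError here; excluded by Pre_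
    else
      let normalized := l.map (fun v => max 1 (min beam_size v))
      (PySem.List.pyRange 1 (normalized.length : Int) 1).foldl
        (fun acc idx =>
          PySem.List.pySetD acc idx
            (min (PySem.List.pyGetD acc (idx - 1) 0) (PySem.List.pyGetD acc idx 0)))
        normalized

-- ===== PORT B =====
-- Source B's _prefix_min: divide-and-conquer prefix minima of the raw values
def pvPrefixMin (l : List Int) : List Int :=
  if _h : l.length ≤ 1 then l
  else
    let mid := l.length / 2
    let left := pvPrefixMin (l.take mid)
    let right := pvPrefixMin (l.drop mid)
    let last := left.getLastD 0   -- Python's left[-1]; left is nonempty (mid ≥ 1), default unreachable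
    left ++ right.map (fun r => min last r)
  termination_by l.length
  decreasing_by
    · simp only [List.length_take]; omega
    · simp only [List.length_drop]; omega

def normalize_beam_schedule_alt (beam_size : Int) (num_steps : Int) (beam_schedule : Option (List Int)) : List Int :=
  match beam_schedule with
  | none => if num_steps ≤ 0 then [] else List.replicate num_steps.toNat (max 1 beam_size)
  | some l =>
    if (l.length : Int) ≠ num_steps then []  -- Python raises ValueError here; excluded by Pre_
    else (pvPrefixMin l).map (fun m => max 1 (min beam_size m))

-- ===== PRECONDITION & SPEC =====
-- Pre_ excludes exactly the inputs where both Pythons raise ValueError: a list whose length ≠ num_steps.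
def Pre_normalize_beam_schedule (beam_size : Int) (num_steps : Int) (beam_schedule : Option (List Int)) : Prop :=
  ((beam_schedule.map (fun l => ((l.length : Int) == num_steps))).getD true) = true
instance (beam_size : Int) (num_steps : Int) (beam_schedule : Option (List Int)) : Decidable (Pre_normalize_beam_schedule beam_size num_steps beam_schedule) := by unfold Pre_normalize_beam_schedule; infer_instance

def pvWitness_normalize_beam_schedule : Int × Int × Option (List Int) := (5, 3, some [4, 7, 2])

def Spec_normalize_beam_schedule (beam_size : Int) (num_steps : Int) (beam_schedule : Option (List Int)) (out : List Int) : Prop := out = normalize_beam_schedule_alt beam_size num_steps beam_schedule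
instance (beam_size : Int) (num_steps : Int) (beam_schedule : Option (List Int)) (out : List Int) : Decidable (Spec_normalize_beam_schedule beam_size num_steps beam_schedule out) := by unfold Spec_normalize_beam_schedule; infer_instance

-- ===== CLAIM (what is proved, stated in full; the proofs are below) =====
def Claim_equal_normalize_beam_schedule : Prop := ∀ (beam_size : Int) (num_steps : Int) (beam_schedule : Option (List Int)), Dom_normalize_beam_schedule beam_size num_steps beam_schedule → Pre_normalize_beam_schedule beam_size num_steps beam_schedule → Spec_normalize_beam_schedule beam_size num_steps beam_schedule (normalize_beam_schedule beam_size num_steps beam_schedule)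

-- ===== LEMMAS AND PROOFS =====

-- reference prefix-minimum scan seeded with cur
def pvPm (cur : Int) : List Int → List Int
  | [] => []
  | x :: xs => min cur x :: pvPm (min cur x) xs

-- reference prefix minima
def pvPmSpec : List Int → List Int
  | [] => []
  | x :: xs => x :: pvPm x xs

lemma pvPm_append (c : Int) (xs ys : List Int) :
    pvPm c (xs ++ ys) = pvPm c xs ++ pvPm (xs.foldl min c) ys := by
  induction xs generalizing c with
  | nil => simp [pvPm]
  | cons x xs ih => simp [pvPm, ih]

lemma pvPm_min (c d : Int) (xs : List Int) :
    pvPm (min c d) xs = (pvPm d xs).map (fun r => min c r) := by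
  induction xs generalizing d with
  | nil => rfl
  | cons y ys ih => simp [pvPm, min_assoc, ih (min d y)]

lemma pvPm_eq_map_spec (m : Int) (l : List Int) :
    pvPm m l = (pvPmSpec l).map (fun r => min m r) := by
  cases l with
  | nil => rfl
  | cons x xs => simp [pvPm, pvPmSpec, ← pvPm_min]

lemma pvPm_getLastD (c : Int) (xs : List Int) :
    (pvPm c xs).getLastD c = xs.foldl min c := by
  induction xs generalizing c with
  | nil => rfl
  | cons y ys ih =>
    simp only [pvPm, List.foldl_cons, List.getLastD_cons]
    exact ih (min c y)

lemma pvPmSpec_append (L R : List Int) (hL : L ≠ []) :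
    pvPmSpec (L ++ R) = pvPmSpec L ++ (pvPmSpec R).map (fun r => min ((pvPmSpec L).getLastD 0) r) := by
  match L with
  | x :: xs =>
    have hlast : (pvPmSpec (x :: xs)).getLastD 0 = xs.foldl min x := by
      show (x :: pvPm x xs).getLastD 0 = xs.foldl min x
      rw [List.getLastD_cons]
      exact pvPm_getLastD x xs
    show pvPmSpec (x :: (xs ++ R)) = _
    rw [hlast]
    show x :: pvPm x (xs ++ R) = _
    rw [pvPm_append, pvPm_eq_map_spec (xs.foldl min x) R]
    rfl

lemma pvPrefixMin_eq (l : List Int) : pvPrefixMin l = pvPmSpec l := by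
  fun_induction pvPrefixMin l with
  | case1 l h =>
    match l, h with
    | [], _ => rfl
    | [x], _ => simp [pvPmSpec, pvPm]
  | case2 l h mid left htake right hdrop last =>
    have h2 : 2 ≤ l.length := by omega
    have hmid1 : 1 ≤ mid := by simp only [mid]; omega
    simp only [htake, hdrop, last, left, right]
    have htne : l.take mid ≠ [] := by
      intro hc
      have hlc := congrArg List.length hc
      simp only [List.length_take, List.length_nil, mid] at hlc
      omega
    rw [← pvPmSpec_append _ _ htne, List.take_append_drop]

lemma clamp_min (bs a b : Int) :
    max 1 (min bs (min a b)) = min (max 1 (min bs a)) (max 1 (min bs b)) := by omega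

lemma map_clamp_pvPm (bs c : Int) (xs : List Int) :
    (pvPm c xs).map (fun m => max 1 (min bs m))
      = pvPm (max 1 (min bs c)) (xs.map (fun m => max 1 (min bs m))) := by
  induction xs generalizing c with
  | nil => rfl
  | cons y ys ih => simp [pvPm, clamp_min, ih]

lemma map_clamp_pvPmSpec (bs : Int) (l : List Int) :
    (pvPmSpec l).map (fun m => max 1 (min bs m))
      = pvPmSpec (l.map (fun m => max 1 (min bs m))) := by
  cases l with
  | nil => rfl
  | cons x xs => simp [pvPmSpec, map_clamp_pvPm]

-- A's in-place loop over a prefix p already processed and suffix s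
lemma pvLoopA (p s : List Int) (hp : p ≠ []) :
    (PySem.List.pyRange (p.length : Int) ((p.length + s.length : Nat) : Int) 1).foldl
      (fun acc idx =>
        PySem.List.pySetD acc idx
          (min (PySem.List.pyGetD acc (idx - 1) 0) (PySem.List.pyGetD acc idx 0)))
      (p ++ s)
    = p ++ pvPm (p.getLast hp) s := by
  induction s generalizing p with
  | nil => simp [PySem.List.pyRange_one_eq_nil, pvPm]
  | cons y ys ih =>
    rw [PySem.List.pyRange_one_cons (by
      have h0 : 0 < (y :: ys).length := by simp
      omega)]
    simp only [List.foldl_cons]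
    have hget1 : PySem.List.pyGetD (p ++ y :: ys) ((p.length : Int) - 1) 0 = p.getLast hp := by
      have h1 : ((p.length : Int) - 1) = ((p.length - 1 : Nat) : Int) := by
        have : 1 ≤ p.length := List.length_pos_iff.mpr hp
        push_cast [this]; ring
      rw [h1, PySem.List.pyGetD_natCast]
      have hlt : p.length - 1 < p.length := by
        have : 1 ≤ p.length := List.length_pos_iff.mpr hp
        omega
      rw [List.getD_eq_getElem _ _ (by simpa using Nat.lt_add_right _ hlt)]
      rw [List.getElem_append_left hlt, List.getLast_eq_getElem]
    have hget2 : PySem.List.pyGetD (p ++ y :: ys) (p.length : Int) 0 = y := by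
      rw [PySem.List.pyGetD_natCast]
      rw [List.getD_eq_getElem _ _ (by simp)]
      simp
    have hset : PySem.List.pySetD (p ++ y :: ys) (p.length : Int)
        (min (p.getLast hp) y) = p ++ min (p.getLast hp) y :: ys := by
      rw [PySem.List.pySetD_natCast]
      rw [List.set_append_right _ _ (le_refl _)]
      simp
    rw [hget1, hget2, hset]
    have hne : (p ++ [min (p.getLast hp) y]) ≠ [] := by simp
    have hIH := ih (p ++ [min (p.getLast hp) y]) hne
    have hlast : (p ++ [min (p.getLast hp) y]).getLast hne = min (p.getLast hp) y := by
      simp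
    rw [hlast] at hIH
    have hlen : ((p ++ [min (p.getLast hp) y]).length : Int) = (p.length : Int) + 1 := by
      simp
    have hlen2 : (((p ++ [min (p.getLast hp) y]).length + ys.length : Nat) : Int)
        = ((p.length + (y :: ys).length : Nat) : Int) := by
      simp
      ring
    rw [hlen, hlen2] at hIH
    have happ : (p ++ [min (p.getLast hp) y]) ++ ys = p ++ min (p.getLast hp) y :: ys := by
      simp
    rw [happ] at hIH
    rw [hIH]
    simp [pvPm]

-- ===== VERDICT (by name: the statement is the Claim_ definition above) =====
theorem normalize_beam_schedule_spec : Claim_equal_normalize_beam_schedule := by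
  intro bs ns sched _hdom hpre
  unfold Spec_normalize_beam_schedule
  match sched with
  | none =>
    simp [normalize_beam_schedule, normalize_beam_schedule_alt, build_dynamic_beam_schedule]
  | some l =>
    have hlen : (l.length : Int) = ns := by
      simpa [Pre_normalize_beam_schedule] using hpre
    unfold normalize_beam_schedule normalize_beam_schedule_alt
    simp only [hlen, ne_eq, not_true_eq_false, if_false]
    rw [pvPrefixMin_eq, map_clamp_pvPmSpec]
    match l with
    | [] => rfl
    | x :: xs =>
      have h := pvLoopA [max 1 (min bs x)] (xs.map (fun v => max 1 (min bs v))) (by simp)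
      simp only [List.length_singleton, List.length_map, Nat.cast_one] at h
      have hlist : ([max 1 (min bs x)] : List Int) ++ xs.map (fun v => max 1 (min bs v))
          = (x :: xs).map (fun v => max 1 (min bs v)) := by simp
      rw [hlist] at h
      have hlen' : (((x :: xs).map (fun v => max 1 (min bs v))).length : Int)
          = ((1 + xs.length : Nat) : Int) := by simp; ring
      rw [← hlen'] at h
      rw [h]
      simp [pvPmSpec, List.getLast]
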